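-- pv_equiv track=rewrite | github.com/Oakstudy/algorithm | Codesignal/Eric/73.SwitchLights.py | solution
-- ===== SOURCE A (Python) =====
-- def solution(a):
--     result = []
--     for i in range(len(a)):
--         acc = 0
--         for j in range(i, len(a)):
--             acc += a[j]
--         result.append(a[i] if acc % 2 == 0 else abs(a[i]-1))
--     return result
-- ===== SOURCE B (Python) =====
-- def solution(a):
--     out = []
--     s = 0
--     for x in reversed(a):
--         s += x
--         out.append(x if s % 2 == 0 else abs(x - 1))
--     out.reverse()
--     return out
-- ===== Notes on version B (the rewrite author's own statement) =====
-- stated objective: faster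
-- what changed: B replaces A's per-index inner summation loop by a single reverse pass that maintains the running suffix sum, turning O(n^2) into O(n).
import Mathlib
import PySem

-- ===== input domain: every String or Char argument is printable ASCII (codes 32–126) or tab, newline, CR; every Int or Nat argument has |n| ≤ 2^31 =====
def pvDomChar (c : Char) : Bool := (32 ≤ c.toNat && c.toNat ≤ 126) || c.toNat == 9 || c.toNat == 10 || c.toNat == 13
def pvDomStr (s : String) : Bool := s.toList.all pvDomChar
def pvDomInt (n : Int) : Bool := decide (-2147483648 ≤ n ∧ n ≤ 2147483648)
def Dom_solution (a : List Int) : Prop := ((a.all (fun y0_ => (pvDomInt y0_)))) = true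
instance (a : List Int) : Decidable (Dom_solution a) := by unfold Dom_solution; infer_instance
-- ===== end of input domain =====

-- B replaces A's per-index inner summation loop by a single reverse pass maintaining
-- the running suffix sum (O(n^2) → O(n)).

-- ===== PORT A =====
def solution (a : List Int) : List Int :=
  (PySem.List.pyRange 0 (a.length : Int) 1).foldl (fun result i =>
    let acc : Int :=
      (PySem.List.pyRange i (a.length : Int) 1).foldl
        (fun acc j => acc + PySem.List.pyGetD a j 0) 0
    result ++ [if PySem.Int.mod acc 2 = 0 then PySem.List.pyGetD a i 0
               else |PySem.List.pyGetD a i 0 - 1|]) []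

-- ===== PORT B =====
def solution_alt (a : List Int) : List Int :=
  let p : Int × List Int :=
    a.reverse.foldl (fun (p : Int × List Int) x =>
      let s := p.1 + x
      (s, p.2 ++ [if PySem.Int.mod s 2 = 0 then x else |x - 1|])) (0, [])
  p.2.reverse

-- ===== PRECONDITION & SPEC =====
def Spec_solution (a : List Int) (out : List Int) : Prop := out = solution_alt a
instance (a : List Int) (out : List Int) : Decidable (Spec_solution a out) := by unfold Spec_solution; infer_instance

-- ===== CLAIM (what is proved, stated in full; the proofs are below) =====
def Claim_equal_solution : Prop := ∀ (a : List Int), Dom_solution a → Spec_solution a (solution a)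

-- ===== LEMMAS AND PROOFS =====

/-- Toggling function: keep x if the suffix sum s is even, else |x - 1|. -/
def pvG (s x : Int) : Int := if PySem.Int.mod s 2 = 0 then x else |x - 1|

/-- Common specification: head entry uses the whole sum, then recurse on the tail. -/
def pvSpec : List Int → List Int
  | [] => []
  | x :: xs => pvG (x + xs.sum) x :: pvSpec xs

/-- B's left fold over the reversed list, one step at a time. -/
lemma alt_fold_cons (step : Int × List Int → Int → Int × List Int) (y : Int) (ys : List Int)
    (init : Int × List Int) :
    (y :: ys).reverse.foldl step init = step (ys.reverse.foldl step init) y := by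
  simp [List.foldl_append]

lemma alt_fold_spec (a : List Int) :
    a.reverse.foldl (fun (p : Int × List Int) x =>
      (p.1 + x, p.2 ++ [if PySem.Int.mod (p.1 + x) 2 = 0 then x else |x - 1|])) (0, []) =
      (a.sum, (pvSpec a).reverse) := by
  induction a with
  | nil => simp [pvSpec]
  | cons y ys ih =>
      rw [alt_fold_cons, ih]
      simp [pvSpec, pvG, add_comm]

lemma alt_eq_spec (a : List Int) : solution_alt a = pvSpec a := by
  unfold solution_alt
  rw [alt_fold_spec]
  simp

lemma a_map_form (a : List Int) :
    (List.range a.length).map (fun k => pvG ((a.drop k).sum) (a.getD k 0)) = pvSpec a := by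
  induction a with
  | nil => simp [pvSpec]
  | cons x xs ih =>
      rw [List.length_cons, List.range_succ_eq_map, List.map_cons, List.map_map]
      simp only [List.drop_zero, List.getD_cons_zero, List.sum_cons, pvSpec]
      refine congrArg₂ List.cons rfl ?_
      rw [← ih]
      apply List.map_congr_left
      intro k _
      simp [Function.comp]

lemma a_eq_spec (a : List Int) : solution a = pvSpec a := by
  unfold solution
  rw [PySem.List.foldl_append_singleton_eq_map, List.nil_append]
  rw [← a_map_form a]
  rw [PySem.List.pyRange_one, List.map_map]
  apply List.map_congr_left
  intro k hk
  simp only [List.mem_range] at hk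
  have h0 : (0 : Int) ≤ (k : Int) := by positivity
  simp only [Function.comp, zero_add]
  rw [PySem.List.foldl_pyRange_pyGetD' a 0 (fun acc x => acc + x) 0 h0]
  simp [pvG, List.sum_eq_foldl]

-- ===== VERDICT (by name: the statement is the Claim_ definition above) =====
theorem solution_spec : Claim_equal_solution := by
  intro a _
  unfold Spec_solution
  rw [a_eq_spec, alt_eq_spec]
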